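-- pv_equiv track=rewrite | github.com/pedbcrespo/city-data-center | streets.py | getDistricutedStates
-- ===== SOURCE A (Python) =====
-- from typing import List
--
-- def getDistricutedStates(states:list) -> List[List[dict]]:
--     ufMatrix = [
--         ["SP", "AM", "RO"],
--         ["MG"],
--         ["RS", "GO", "DF", "RR", "AP"],
--         ["BA", "SC", "AC", "ES"],
--         ["PR", "PE", "MA", "PA", "CE"],
--     ]
--     distributedStates = []
--     for ufList in ufMatrix:
--         distributedStates.append([state for state in states if state['abbreviation'] in ufList])
--     return distributedStates
-- ===== SOURCE B (Python) =====
-- def getDistricutedStates(states: list):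
--     ufMatrix = [
--         ["SP", "AM", "RO"],
--         ["MG"],
--         ["RS", "GO", "DF", "RR", "AP"],
--         ["BA", "SC", "AC", "ES"],
--         ["PR", "PE", "MA", "PA", "CE"],
--     ]
--     idx = {uf: i for i, row in enumerate(ufMatrix) for uf in row}
--     distributedStates = [[] for _ in ufMatrix]
--     for state in states:
--         i = idx.get(state['abbreviation'])
--         if i is not None:
--             distributedStates[i].append(state)
--     return distributedStates
-- ===== Notes on version B (the rewrite author's own statement) =====
-- stated objective: alternative
-- what changed: A filters the whole states list once per region (five passes, each with a list-membership test); B precomputes an abbreviation-to-group-index dict from the constant matrix, starts with five empty groups and routes each state in a single pass over states.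
import Mathlib
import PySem

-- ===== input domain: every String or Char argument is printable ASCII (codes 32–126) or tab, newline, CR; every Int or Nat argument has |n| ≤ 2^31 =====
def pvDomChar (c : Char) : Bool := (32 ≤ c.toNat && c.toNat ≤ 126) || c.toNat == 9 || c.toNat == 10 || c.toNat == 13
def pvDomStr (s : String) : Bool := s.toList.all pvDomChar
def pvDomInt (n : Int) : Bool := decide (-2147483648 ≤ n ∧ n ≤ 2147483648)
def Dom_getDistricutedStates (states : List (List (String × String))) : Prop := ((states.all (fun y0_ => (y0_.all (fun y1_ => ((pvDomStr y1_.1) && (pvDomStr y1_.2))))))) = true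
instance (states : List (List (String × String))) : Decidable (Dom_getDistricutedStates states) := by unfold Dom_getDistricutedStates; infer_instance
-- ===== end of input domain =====

-- B replaces A's five filter passes over `states` by one pass that routes each
-- state through a precomputed abbreviation→group-index dict (objective: alternative).

-- ===== PORT A =====
-- the constant matrix of A
def pvUfMatrix : List (List String) :=
  [["SP", "AM", "RO"],
   ["MG"],
   ["RS", "GO", "DF", "RR", "AP"],
   ["BA", "SC", "AC", "ES"],
   ["PR", "PE", "MA", "PA", "CE"]]

-- state['abbreviation']: first-match lookup; Pre_ excludes the missing-key KeyError,
-- so the "" default is never consulted on admitted inputs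
def pvAbbr (state : List (String × String)) : String :=
  (PySem.Dict.mk state).getD "abbreviation" ""

def getDistricutedStates (states : List (List (String × String))) : List (List (List (String × String))) :=
  pvUfMatrix.foldl
    (fun distributedStates ufList =>
      distributedStates ++ [states.filter (fun state => ufList.contains (pvAbbr state))])
    []

-- ===== PORT B =====
-- idx = {uf: i for i, row in enumerate(ufMatrix) for uf in row}
def pvIdx : PySem.Dict String Int :=
  (PySem.List.enumerate pvUfMatrix).foldl
    (fun d p => p.2.foldl (fun d uf => d.insert uf p.1) d)
    PySem.Dict.empty

-- distributedStates[i].append(x)  (i is a nonnegative index produced by the dict)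
def pvAppendAt {α : Type} : List (List α) → Int → α → List (List α)
  | [], _, _ => []
  | l :: ls, i, x => if i = 0 then (l ++ [x]) :: ls else l :: pvAppendAt ls (i - 1) x

def getDistricutedStates_alt (states : List (List (String × String))) : List (List (List (String × String))) :=
  states.foldl
    (fun distributedStates state =>
      match pvIdx.get? (pvAbbr state) with
      | some i => pvAppendAt distributedStates i state
      | none => distributedStates)
    [[], [], [], [], []]

-- ===== PRECONDITION & SPEC =====
-- Pre_ excludes exactly the inputs where some state dict lacks the key
-- "abbreviation", on which Python A raises KeyError.
def Pre_getDistricutedStates (states : List (List (String × String))) : Prop :=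
  (states.all (fun state => (PySem.Dict.mk state).contains "abbreviation")) = true
instance (states : List (List (String × String))) : Decidable (Pre_getDistricutedStates states) := by unfold Pre_getDistricutedStates; infer_instance

def pvWitness_getDistricutedStates : (List (List (String × String))) :=
  [[("abbreviation", "SP"), ("name", "Sao Paulo")], [("abbreviation", "XX")]]

def Spec_getDistricutedStates (states : List (List (String × String))) (out : List (List (List (String × String)))) : Prop := out = getDistricutedStates_alt states
instance (states : List (List (String × String))) (out : List (List (List (String × String)))) : Decidable (Spec_getDistricutedStates states out) := by unfold Spec_getDistricutedStates; infer_instance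

-- ===== CLAIM (what is proved, stated in full; the proofs are below) =====
def Claim_equal_getDistricutedStates : Prop := ∀ (states : List (List (String × String))), Dom_getDistricutedStates states → Pre_getDistricutedStates states → Spec_getDistricutedStates states (getDistricutedStates states)

-- ===== LEMMAS AND PROOFS =====

-- the routing dict, written out (a closed-term computation)
theorem pvIdx_eq : pvIdx = PySem.Dict.mk
    [("SP", 0), ("AM", 0), ("RO", 0), ("MG", 1),
     ("RS", 2), ("GO", 2), ("DF", 2), ("RR", 2), ("AP", 2),
     ("BA", 3), ("SC", 3), ("AC", 3), ("ES", 3),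
     ("PR", 4), ("PE", 4), ("MA", 4), ("PA", 4), ("CE", 4)] := by decide

-- one step of B's loop on a 5-list accumulator equals appending to each group
-- exactly when the abbreviation lies in that group's row (19-way case analysis
-- on the abbreviation: one case per state abbreviation the matrix knows, one for
-- every other string)
set_option maxRecDepth 8192 in
theorem pvStep (a : String) (s : List (String × String))
    (l0 l1 l2 l3 l4 : List (List (String × String))) :
    (match pvIdx.get? a with
     | some i => pvAppendAt [l0, l1, l2, l3, l4] i s
     | none => [l0, l1, l2, l3, l4]) =
    [l0 ++ (if (pvUfMatrix[0]).contains a then [s] else []),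
     l1 ++ (if (pvUfMatrix[1]).contains a then [s] else []),
     l2 ++ (if (pvUfMatrix[2]).contains a then [s] else []),
     l3 ++ (if (pvUfMatrix[3]).contains a then [s] else []),
     l4 ++ (if (pvUfMatrix[4]).contains a then [s] else [])] := by
  by_cases h1 : a = "SP"; · rw [h1]; simp [pvIdx_eq, PySem.Dict.get?_mk_cons, pvUfMatrix, pvAppendAt]
  by_cases h2 : a = "AM"; · rw [h2]; simp [pvIdx_eq, PySem.Dict.get?_mk_cons, pvUfMatrix, pvAppendAt]
  by_cases h3 : a = "RO"; · rw [h3]; simp [pvIdx_eq, PySem.Dict.get?_mk_cons, pvUfMatrix, pvAppendAt]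
  by_cases h4 : a = "MG"; · rw [h4]; simp [pvIdx_eq, PySem.Dict.get?_mk_cons, pvUfMatrix, pvAppendAt]
  by_cases h5 : a = "RS"; · rw [h5]; simp [pvIdx_eq, PySem.Dict.get?_mk_cons, pvUfMatrix, pvAppendAt]
  by_cases h6 : a = "GO"; · rw [h6]; simp [pvIdx_eq, PySem.Dict.get?_mk_cons, pvUfMatrix, pvAppendAt]
  by_cases h7 : a = "DF"; · rw [h7]; simp [pvIdx_eq, PySem.Dict.get?_mk_cons, pvUfMatrix, pvAppendAt]
  by_cases h8 : a = "RR"; · rw [h8]; simp [pvIdx_eq, PySem.Dict.get?_mk_cons, pvUfMatrix, pvAppendAt]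
  by_cases h9 : a = "AP"; · rw [h9]; simp [pvIdx_eq, PySem.Dict.get?_mk_cons, pvUfMatrix, pvAppendAt]
  by_cases h10 : a = "BA"; · rw [h10]; simp [pvIdx_eq, PySem.Dict.get?_mk_cons, pvUfMatrix, pvAppendAt]
  by_cases h11 : a = "SC"; · rw [h11]; simp [pvIdx_eq, PySem.Dict.get?_mk_cons, pvUfMatrix, pvAppendAt]
  by_cases h12 : a = "AC"; · rw [h12]; simp [pvIdx_eq, PySem.Dict.get?_mk_cons, pvUfMatrix, pvAppendAt]
  by_cases h13 : a = "ES"; · rw [h13]; simp [pvIdx_eq, PySem.Dict.get?_mk_cons, pvUfMatrix, pvAppendAt]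
  by_cases h14 : a = "PR"; · rw [h14]; simp [pvIdx_eq, PySem.Dict.get?_mk_cons, pvUfMatrix, pvAppendAt]
  by_cases h15 : a = "PE"; · rw [h15]; simp [pvIdx_eq, PySem.Dict.get?_mk_cons, pvUfMatrix, pvAppendAt]
  by_cases h16 : a = "MA"; · rw [h16]; simp [pvIdx_eq, PySem.Dict.get?_mk_cons, pvUfMatrix, pvAppendAt]
  by_cases h17 : a = "PA"; · rw [h17]; simp [pvIdx_eq, PySem.Dict.get?_mk_cons, pvUfMatrix, pvAppendAt]
  by_cases h18 : a = "CE"; · rw [h18]; simp [pvIdx_eq, PySem.Dict.get?_mk_cons, pvUfMatrix, pvAppendAt]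
  simp [pvIdx_eq, PySem.Dict.get?, pvUfMatrix,
    Ne.symm h1, Ne.symm h2, Ne.symm h3, Ne.symm h4, Ne.symm h5, Ne.symm h6,
    Ne.symm h7, Ne.symm h8, Ne.symm h9, Ne.symm h10, Ne.symm h11, Ne.symm h12,
    Ne.symm h13, Ne.symm h14, Ne.symm h15, Ne.symm h16, Ne.symm h17, Ne.symm h18,
    h1, h2, h3, h4, h5, h6, h7, h8, h9, h10, h11, h12, h13, h14, h15, h16, h17, h18]

-- invariant of B's single pass: each accumulator slot collects its row's filter
theorem pvFold_inv (states : List (List (String × String)))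
    (l0 l1 l2 l3 l4 : List (List (String × String))) :
    states.foldl
      (fun distributedStates state =>
        match pvIdx.get? (pvAbbr state) with
        | some i => pvAppendAt distributedStates i state
        | none => distributedStates)
      [l0, l1, l2, l3, l4] =
    [l0 ++ states.filter (fun s => (pvUfMatrix[0]).contains (pvAbbr s)),
     l1 ++ states.filter (fun s => (pvUfMatrix[1]).contains (pvAbbr s)),
     l2 ++ states.filter (fun s => (pvUfMatrix[2]).contains (pvAbbr s)),
     l3 ++ states.filter (fun s => (pvUfMatrix[3]).contains (pvAbbr s)),
     l4 ++ states.filter (fun s => (pvUfMatrix[4]).contains (pvAbbr s))] := by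
  induction states generalizing l0 l1 l2 l3 l4 with
  | nil => simp
  | cons s t ih =>
      rw [List.foldl_cons, pvStep (pvAbbr s) s, ih]
      simp only [List.filter_cons]
      split_ifs <;> simp

-- ===== VERDICT (by name: the statement is the Claim_ definition above) =====
theorem getDistricutedStates_spec : Claim_equal_getDistricutedStates := by
  intro states _ _
  unfold Spec_getDistricutedStates getDistricutedStates getDistricutedStates_alt
  rw [pvFold_inv]
  simp [pvUfMatrix, List.foldl]
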